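-- pv_equiv track=rewrite | github.com/takzobye/ku-elab | lab13/01.py | create_factors_3_7
-- ===== SOURCE A (Python) =====
-- def create_factors_3_7(n):
--     ls = []
--
--     i = 1
--     while len(ls) != n:
--         if i % 3 == 0 or i % 7 == 0:
--             ls.append(i)
--         i += 1
--
--     return ls
-- ===== SOURCE B (Python) =====
-- def create_factors_3_7(n):
--     # The hits repeat with period 21 (9 per period): closed form, no scanning.
--     hits = [3, 6, 7, 9, 12, 14, 15, 18, 21]
--     return [21 * (k // 9) + hits[k % 9] for k in range(n)]
-- ===== Notes on version B (the rewrite author's own statement) =====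
-- stated objective: faster
-- what changed: B replaces A's scan-every-integer-and-test-modulo loop with a closed form: the hits repeat with period 21 (9 per period), so the k-th element is 21*(k//9) + hits[k%9], computed by a single comprehension over range(n).
import Mathlib
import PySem

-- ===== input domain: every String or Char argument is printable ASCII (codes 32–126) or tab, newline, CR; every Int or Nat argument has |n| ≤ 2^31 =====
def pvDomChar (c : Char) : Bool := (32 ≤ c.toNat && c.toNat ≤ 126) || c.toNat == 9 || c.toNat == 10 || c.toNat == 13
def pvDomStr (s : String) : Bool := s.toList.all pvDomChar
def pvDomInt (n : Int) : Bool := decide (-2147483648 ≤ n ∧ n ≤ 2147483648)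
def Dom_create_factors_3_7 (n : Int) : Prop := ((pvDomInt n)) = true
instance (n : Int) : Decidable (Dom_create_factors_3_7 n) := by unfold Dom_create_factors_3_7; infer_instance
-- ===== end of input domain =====

-- B replaces A's scan-and-test-modulo loop by the closed form 21*(k//9) + hits[k%9]
-- (the hit pattern repeats with period 21, 9 hits per period); same return value on 0 ≤ n.

-- ===== PORT A =====
-- A's while-loop as fuel recursion; the fuel is only a totality guard (inside Pre_ the loop
-- collects its n-th element within 3*n+3 iterations, so the fuel is never exhausted).
def create_factors_3_7_go (n : Int) (ls : List Int) (i : Int) : Nat → List Int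
  | 0 => ls
  | fuel + 1 =>
    if (ls.length : Int) = n then ls
    else if PySem.Int.mod i 3 = 0 ∨ PySem.Int.mod i 7 = 0 then
      create_factors_3_7_go n (ls ++ [i]) (i + 1) fuel
    else
      create_factors_3_7_go n ls (i + 1) fuel

def create_factors_3_7 (n : Int) : List Int :=
  create_factors_3_7_go n [] 1 (3 * n.toNat + 3)

-- ===== PORT B =====
-- Source B's 'hits' list
def pvHits : List Int := [3, 6, 7, 9, 12, 14, 15, 18, 21]

-- Source B's comprehension: [21 * (k // 9) + hits[k % 9] for k in range(n)].
-- For k in range(n) the index (mod k 9) is always in [0, 9), so pyGet? is always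
-- some and the .getD 0 default is never used (Python's hits[k % 9] never raises here).
def create_factors_3_7_alt (n : Int) : List Int :=
  (PySem.List.pyRange 0 n 1).map (fun k =>
    21 * PySem.Int.floordiv k 9 + (PySem.List.pyGet? pvHits (PySem.Int.mod k 9)).getD 0)

-- ===== PRECONDITION & SPEC =====
-- For n < 0 the Python A never terminates: len(ls) starts at 0 and only grows past n.
def Pre_create_factors_3_7 (n : Int) : Prop := 0 ≤ n
instance (n : Int) : Decidable (Pre_create_factors_3_7 n) := by unfold Pre_create_factors_3_7; infer_instance
def pvWitness_create_factors_3_7 : Int := (9)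

def Spec_create_factors_3_7 (n : Int) (out : List Int) : Prop := out = create_factors_3_7_alt n
instance (n : Int) (out : List Int) : Decidable (Spec_create_factors_3_7 n out) := by unfold Spec_create_factors_3_7; infer_instance

-- ===== CLAIM (what is proved, stated in full; the proofs are below) =====
def Claim_equal_create_factors_3_7 : Prop := ∀ (n : Int), Dom_create_factors_3_7 n → Pre_create_factors_3_7 n → Spec_create_factors_3_7 n (create_factors_3_7 n)

-- ===== LEMMAS AND PROOFS =====

-- "i is divisible by 3 or by 7": the predicate A's loop enumerates.
def pvHit (i : Int) : Bool := decide (3 ∣ i) || decide (7 ∣ i)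

-- the next hit at or after i (every window of 3 consecutive ints contains a multiple of 3)
def pvNext (i : Int) : Int :=
  if pvHit i then i else if pvHit (i + 1) then i + 1 else i + 2

-- reference stream: the next k hits starting at i, in increasing order
def pvGen : Nat → Int → List Int
  | 0, _ => []
  | k + 1, i => pvNext i :: pvGen k (pvNext i + 1)

-- position after consuming a hits starting at i
def pvEnd : Nat → Int → Int
  | 0, i => i
  | a + 1, i => pvEnd a (pvNext i + 1)

-- the closed form of Source B, in Nat terms
def pvG (k : Nat) : Int := 21 * ((k / 9 : Nat) : Int) + pvHits.getD (k % 9) 0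

lemma pvHit_iff (i : Int) : pvHit i = true ↔ (3 ∣ i ∨ 7 ∣ i) := by
  simp [pvHit]

lemma pvNext_bounds (i : Int) : i ≤ pvNext i ∧ pvNext i ≤ i + 2 := by
  unfold pvNext; split_ifs <;> omega

lemma pvNext_of_hit {i : Int} (h : pvHit i = true) : pvNext i = i := by
  simp [pvNext, h]

lemma pvNext_of_not_hit {i : Int} (h : pvHit i = false) : pvNext i = pvNext (i + 1) := by
  by_cases h1 : pvHit (i + 1) = true
  · simp [pvNext, h, h1]
  · have h1' : pvHit (i + 1) = false := by simpa using h1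
    have a1 : ¬ (3 ∣ i) := by intro hd; simp [pvHit, hd] at h
    have a2 : ¬ (3 ∣ (i + 1)) := by intro hd; simp [pvHit, hd] at h1'
    have h2 : pvHit (i + 2) = true := by
      have hd : (3 : Int) ∣ (i + 2) := by omega
      simp [pvHit, hd]
    have e : i + 1 + 1 = i + 2 := by ring
    rw [pvNext, pvNext, e]
    simp [h, h1', h2]

lemma pvGen_not_hit {i : Int} (k : Nat) (h : pvHit i = false) :
    pvGen k i = pvGen k (i + 1) := by
  cases k with
  | zero => rfl
  | succ k => simp [pvGen, pvNext_of_not_hit h]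

-- A's loop produces ls ++ the next (n - |ls|) hits starting at i, given enough fuel.
lemma goA_eq (n : Int) : ∀ (fuel : Nat) (ls : List Int) (i : Int),
    (ls.length : Int) ≤ n →
    3 * (n - ls.length) + (pvNext i - i) ≤ (fuel : Int) →
    create_factors_3_7_go n ls i fuel = ls ++ pvGen (n - ls.length).toNat i := by
  intro fuel
  induction fuel with
  | zero =>
    intro ls i hle hf
    have hb := pvNext_bounds i
    have hz : (n - (ls.length : Int)).toNat = 0 := by omega
    simp [create_factors_3_7_go, hz, pvGen]
  | succ fuel ih =>
    intro ls i hle hf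
    by_cases hdone : (ls.length : Int) = n
    · have hz : (n - (ls.length : Int)).toNat = 0 := by omega
      simp [create_factors_3_7_go, hdone, pvGen]
    · have hlt : (ls.length : Int) < n := lt_of_le_of_ne hle hdone
      have hk : (n - (ls.length : Int)).toNat = (n - (ls.length : Int) - 1).toNat + 1 := by omega
      by_cases hhit : pvHit i = true
      · have hcond : PySem.Int.mod i 3 = 0 ∨ PySem.Int.mod i 7 = 0 := by
          rw [PySem.Int.mod_eq_zero_iff_dvd, PySem.Int.mod_eq_zero_iff_dvd]
          exact (pvHit_iff i).mp hhit
        have hni : pvNext i = i := pvNext_of_hit hhit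
        have hb' := pvNext_bounds (i + 1)
        have hrec := ih (ls ++ [i]) (i + 1)
          (by simp; omega)
          (by simp; omega)
        simp only [create_factors_3_7_go, hdone, if_false, hcond, if_true]
        rw [hrec, hk]
        have hcons : pvGen ((n - (ls.length : Int) - 1).toNat + 1) i
            = i :: pvGen (n - (ls.length : Int) - 1).toNat (i + 1) := by
          simp [pvGen, hni]
        rw [hcons]
        have hl2 : (n - ((ls ++ [i]).length : Int)).toNat = (n - (ls.length : Int) - 1).toNat := by
          simp; omega
        rw [hl2]
        simp
      · have hhit' : pvHit i = false := by simpa using hhit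
        have hcond : ¬ (PySem.Int.mod i 3 = 0 ∨ PySem.Int.mod i 7 = 0) := by
          rw [PySem.Int.mod_eq_zero_iff_dvd, PySem.Int.mod_eq_zero_iff_dvd]
          intro hc
          exact hhit ((pvHit_iff i).mpr hc)
        have hnext : pvNext i = pvNext (i + 1) := pvNext_of_not_hit hhit'
        have hb := pvNext_bounds i
        have hrec := ih ls (i + 1) hle (by omega)
        simp only [create_factors_3_7_go, hdone, if_false, hcond]
        rw [hrec, pvGen_not_hit _ hhit']

-- periodicity of the hit pattern under +21
lemma pvHit_add21 (i : Int) : pvHit (i + 21) = pvHit i := by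
  unfold pvHit
  rw [decide_eq_decide.mpr (show (3 : Int) ∣ i + 21 ↔ 3 ∣ i by omega),
      decide_eq_decide.mpr (show (7 : Int) ∣ i + 21 ↔ 7 ∣ i by omega)]

lemma pvNext_add21 (i : Int) : pvNext (i + 21) = pvNext i + 21 := by
  unfold pvNext
  rw [show i + 21 + 1 = (i + 1) + 21 by ring, pvHit_add21, pvHit_add21]
  split_ifs <;> ring

lemma pvGen_add21 (m : Nat) : ∀ i : Int, pvGen m (i + 21) = (pvGen m i).map (· + 21) := by
  induction m with
  | zero => intro i; rfl
  | succ m ih =>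
    intro i
    simp only [pvGen, pvNext_add21]
    rw [show pvNext i + 21 + 1 = (pvNext i + 1) + 21 by ring, ih]
    simp

-- splitting the stream
lemma pvGen_add (a : Nat) : ∀ (b : Nat) (i : Int),
    pvGen (a + b) i = pvGen a i ++ pvGen b (pvEnd a i) := by
  induction a with
  | zero => intro b i; simp [pvGen, pvEnd]
  | succ a ih =>
    intro b i
    have h : a + 1 + b = (a + b) + 1 := by omega
    rw [h]
    show pvNext i :: pvGen (a + b) (pvNext i + 1)
        = (pvNext i :: pvGen a (pvNext i + 1)) ++ pvGen b (pvEnd (a + 1) i)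
    rw [ih b (pvNext i + 1)]
    rfl

lemma pvG_add9 (k : Nat) : pvG (9 + k) = pvG k + 21 := by
  unfold pvG
  have h1 : (9 + k) / 9 = k / 9 + 1 := by omega
  have h2 : (9 + k) % 9 = k % 9 := by omega
  rw [h1, h2]
  push_cast
  ring

-- the first 9*q + r hits starting at 1 are exactly the closed form pvG 0, …, pvG (9*q+r-1)
lemma pvGen_closed (q : Nat) : ∀ r : Nat, r ≤ 9 →
    pvGen (9 * q + r) 1 = (List.range (9 * q + r)).map pvG := by
  induction q with
  | zero =>
    intro r hr
    interval_cases r <;> decide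
  | succ q ih =>
    intro r hr
    have hm : 9 * (q + 1) + r = 9 + (9 * q + r) := by omega
    rw [hm, pvGen_add 9 (9 * q + r) 1]
    have hend : pvEnd 9 1 = 1 + 21 := by decide
    rw [hend, pvGen_add21, ih r hr]
    have h9 : pvGen 9 1 = (List.range 9).map pvG := by decide
    rw [h9]
    conv_rhs => rw [List.range_add, List.map_append, List.map_map]
    congr 1
    rw [List.map_map]
    apply List.map_congr_left
    intro k _
    simp only [Function.comp]
    exact (pvG_add9 k).symm

-- B's port, for 0 ≤ n, is the closed-form list of length n.toNat
lemma alt_eq (n : Int) (hn : 0 ≤ n) :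
    create_factors_3_7_alt n = (List.range n.toNat).map pvG := by
  unfold create_factors_3_7_alt
  rw [PySem.List.pyRange_one, List.map_map]
  have hlen : (n - 0).toNat = n.toNat := by omega
  rw [hlen]
  apply List.map_congr_left
  intro k _
  simp only [Function.comp]
  have hd : PySem.Int.floordiv (0 + (k : Int)) 9 = ((k / 9 : Nat) : Int) := by
    rw [show (0 : Int) + (k : Int) = ((k : Nat) : Int) by ring]
    exact_mod_cast PySem.Int.floordiv_natCast k 9
  have hmod : PySem.Int.mod (0 + (k : Int)) 9 = ((k % 9 : Nat) : Int) := by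
    rw [show (0 : Int) + (k : Int) = ((k : Nat) : Int) by ring]
    exact_mod_cast PySem.Int.mod_natCast k 9
  rw [hd, hmod, PySem.List.pyGet?_natCast]
  unfold pvG
  rfl

-- ===== VERDICT (by name: the statement is the Claim_ definition above) =====
theorem create_factors_3_7_spec : Claim_equal_create_factors_3_7 := by
  unfold Claim_equal_create_factors_3_7
  intro n _ hpre
  unfold Spec_create_factors_3_7 create_factors_3_7
  have hb := pvNext_bounds 1
  have hA := goA_eq n (3 * n.toNat + 3) [] 1 (by simpa using hpre) (by simp; omega)
  rw [hA, alt_eq n hpre]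
  have hz : (n - (([] : List Int).length : Int)).toNat = n.toNat := by simp
  rw [hz]
  have hsplit : n.toNat = 9 * (n.toNat / 9) + n.toNat % 9 := by omega
  rw [hsplit, pvGen_closed (n.toNat / 9) (n.toNat % 9) (by omega)]
  simp
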